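-- pv_equiv track=rewrite | github.com/tscherrie/sag | sag/text_input.py | _split_by_newlines
-- ===== SOURCE A (Python) =====
-- MAX_CHUNK_CHARS = 500
--
-- def _split_by_newlines(text: str) -> list[str]:
--     """Group lines into chunks that fit within MAX_CHUNK_CHARS."""
--     result = []
--     current = []
--     current_len = 0
--     for line in text.split("\n"):
--         line = line.strip()
--         if not line:
--             continue
--         new_len = current_len + len(line) + (1 if current else 0)
--         if current and new_len > MAX_CHUNK_CHARS:
--             result.append("\n".join(current))
--             current = [line]
--             current_len = len(line)
--         else:
--             current.append(line)
--             current_len = new_len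
--     if current:
--         result.append("\n".join(current))
--     return result
-- ===== SOURCE B (Python) =====
-- MAX_CHUNK_CHARS = 500
--
-- def _split_by_newlines(text: str) -> list[str]:
--     """Group lines into chunks that fit within MAX_CHUNK_CHARS."""
--     cleaned = [s for line in text.split("\n") if (s := line.strip())]
--     # prefix[k] = total weight of cleaned[:k], where each line weighs len(line)+1;
--     # a chunk cleaned[i:j] joined with "\n" has length prefix[j] - prefix[i] - 1.
--     prefix = [0]
--     for s in cleaned:
--         prefix.append(prefix[-1] + len(s) + 1)
--     n = len(cleaned)
--     result = []
--     i = 0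
--     while i < n:
--         # binary search the largest j in [i+1, n] whose chunk fits; the first
--         # line is always admitted, so j falls back to i+1 when nothing fits.
--         lo, hi = i + 1, n
--         while lo < hi:
--             mid = (lo + hi + 1) // 2
--             if prefix[mid] - prefix[i] - 1 <= MAX_CHUNK_CHARS:
--                 lo = mid
--             else:
--                 hi = mid - 1
--         result.append("\n".join(cleaned[i:lo]))
--         i = lo
--     return result
-- ===== Notes on version B (the rewrite author's own statement) =====
-- stated objective: alternative
-- what changed: B precomputes a prefix-sum array of line weights and finds each chunk boundary by binary search over it (largest j with prefix[j]-prefix[i]-1 <= 500, falling back to i+1), then slices and joins, instead of A's single accumulate-and-flush greedy pass.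
import Mathlib
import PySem

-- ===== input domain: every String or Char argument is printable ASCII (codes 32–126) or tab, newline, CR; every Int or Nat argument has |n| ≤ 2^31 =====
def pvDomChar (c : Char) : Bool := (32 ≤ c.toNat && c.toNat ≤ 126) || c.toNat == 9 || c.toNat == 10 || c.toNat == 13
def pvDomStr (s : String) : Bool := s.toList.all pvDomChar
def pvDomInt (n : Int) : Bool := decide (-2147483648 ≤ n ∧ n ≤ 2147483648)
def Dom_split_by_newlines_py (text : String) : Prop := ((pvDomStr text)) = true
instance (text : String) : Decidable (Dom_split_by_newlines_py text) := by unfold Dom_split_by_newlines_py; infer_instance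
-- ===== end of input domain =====

-- B replaces A's accumulate-and-flush greedy pass with a prefix-sum array of line weights and a
-- binary search for each chunk boundary, then slices and joins (objective: alternative).

-- ===== PORT A =====
-- the body of A's for-loop, over state (result, current, current_len)
def pvAstep (st : List String × List String × Int) (rawline : String) :
    List String × List String × Int :=
  let line := PySem.Str.strip rawline
  if line = "" then st
  else
    let new_len := st.2.2 + PySem.Str.len line + (if st.2.1 ≠ [] then 1 else 0)
    if st.2.1 ≠ [] ∧ new_len > 500 then
      (st.1 ++ [PySem.Str.join "\n" st.2.1], [line], PySem.Str.len line)
    else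
      (st.1, st.2.1 ++ [line], new_len)

-- text.split("\n"): the separator is the non-empty literal "\n", so split? is always some
def split_by_newlines_py (text : String) : List String :=
  let st := ((PySem.Str.split? text "\n").getD []).foldl pvAstep ([], [], 0)
  if st.2.1 ≠ [] then st.1 ++ [PySem.Str.join "\n" st.2.1] else st.1

-- ===== PORT B =====
-- one step of B's prefix-building loop: prefix.append(prefix[-1] + len(s) + 1)
def pvPrefixStep (p : List Int) (s : String) : List Int :=
  p ++ [PySem.List.pyGetD p (-1) 0 + PySem.Str.len s + 1]

-- termination measures for the two loops of B's port (kept as named lemmas so the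
-- well-founded definitions carry only small proof terms)
theorem pv_dec_left (lo hi : Int) (h : lo < hi) :
    (hi - PySem.Int.floordiv (lo + hi + 1) 2).toNat < (hi - lo).toNat := by
  have hb := PySem.Int.floordiv_two_mid_bounds (lo := lo + 1) (hi := hi) (by omega)
  rw [show lo + hi + 1 = lo + 1 + hi by ring]
  omega

theorem pv_dec_right (lo hi : Int) (h : lo < hi) :
    (PySem.Int.floordiv (lo + hi + 1) 2 - 1 - lo).toNat < (hi - lo).toNat := by
  have hb := PySem.Int.floordiv_two_mid_bounds (lo := lo + 1) (hi := hi) (by omega)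
  rw [show lo + hi + 1 = lo + 1 + hi by ring]
  omega

-- B's inner while loop: binary search the largest j in [lo, hi] whose chunk fits
def pvBsearch (pf : List Int) (i lo hi : Int) : Int :=
  if _h : lo < hi then
    let mid := PySem.Int.floordiv (lo + hi + 1) 2
    if PySem.List.pyGetD pf mid 0 - PySem.List.pyGetD pf i 0 - 1 ≤ 500 then
      pvBsearch pf i mid hi
    else
      pvBsearch pf i lo (mid - 1)
  else lo
termination_by (hi - lo).toNat
decreasing_by
  · exact pv_dec_left lo hi _h
  · exact pv_dec_right lo hi _h

-- needed for termination of pvChunksLoop: the search result is at least lo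
theorem pvBsearch_ge_lo (pf : List Int) (i lo hi : Int) : lo ≤ pvBsearch pf i lo hi := by
  fun_induction pvBsearch pf i lo hi with
  | case1 lo hi h mid hc ih =>
    have hb := PySem.Int.floordiv_two_mid_bounds (lo := lo + 1) (hi := hi) (by omega)
    have he : lo + hi + 1 = lo + 1 + hi := by ring
    simp only [mid, he] at ih ⊢; omega
  | case2 lo hi h mid hc ih => omega
  | case3 lo hi h => omega

theorem pv_dec_loop (pf : List Int) (i n : Int) (h : i < n) :
    (n - pvBsearch pf i (i + 1) n).toNat < (n - i).toNat := by
  have := pvBsearch_ge_lo pf i (i + 1) n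
  omega

-- B's outer while loop over the chunk start index i
def pvChunksLoop (cleaned : List String) (pf : List Int) (i : Int) : List String :=
  if _h : i < (cleaned.length : Int) then
    let j := pvBsearch pf i (i + 1) (cleaned.length : Int)
    PySem.Str.join "\n" (PySem.List.slice cleaned (some i) (some j)) :: pvChunksLoop cleaned pf j
  else []
termination_by ((cleaned.length : Int) - i).toNat
decreasing_by
  exact pv_dec_loop pf i (cleaned.length : Int) _h

def split_by_newlines_py_alt (text : String) : List String :=
  let cleaned := (((PySem.Str.split? text "\n").getD []).map PySem.Str.strip).filter
    (fun s => decide (s ≠ ""))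
  let pf := cleaned.foldl pvPrefixStep [0]
  pvChunksLoop cleaned pf 0

-- ===== PRECONDITION & SPEC =====
def Spec_split_by_newlines_py (text : String) (out : List String) : Prop := out = split_by_newlines_py_alt text
instance (text : String) (out : List String) : Decidable (Spec_split_by_newlines_py text out) := by unfold Spec_split_by_newlines_py; infer_instance

-- ===== CLAIM (what is proved, stated in full; the proofs are below) =====
def Claim_equal_split_by_newlines_py : Prop := ∀ (text : String), Dom_split_by_newlines_py text → Spec_split_by_newlines_py text (split_by_newlines_py text)


-- ===== LEMMAS AND PROOFS =====

-- weight of a list of lines: each line counts len(line)+1 (its joining newline)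
def pvW (ls : List String) : Int := (ls.map (fun s => PySem.Str.len s + 1)).sum

-- greedy count: how many further lines fit into a chunk whose current length is acc
def pvGc (acc : Int) : List String → Nat
  | [] => 0
  | l :: ls => if acc + PySem.Str.len l + 1 ≤ 500 then pvGc (acc + PySem.Str.len l + 1) ls + 1 else 0

-- the common abstract recursion both programs compute: peel off the maximal fitting prefix
def pvChunkRec : List String → List String
  | [] => []
  | l :: ls =>
    PySem.Str.join "\n" (l :: ls.take (pvGc (PySem.Str.len l) ls)) ::
      pvChunkRec (ls.drop (pvGc (PySem.Str.len l) ls))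
termination_by ls => ls.length
decreasing_by simp [List.length_drop]

theorem pvChunkRec_nil : pvChunkRec [] = [] := by rw [pvChunkRec.eq_def]

theorem pvChunkRec_cons (l : String) (ls : List String) :
    pvChunkRec (l :: ls) =
      PySem.Str.join "\n" (l :: ls.take (pvGc (PySem.Str.len l) ls)) ::
        pvChunkRec (ls.drop (pvGc (PySem.Str.len l) ls)) := by rw [pvChunkRec.eq_def]

-- A's loop body on an already-stripped, non-empty line
def pvGA (st : List String × List String × Int) (line : String) :
    List String × List String × Int :=
  let new_len := st.2.2 + PySem.Str.len line + (if st.2.1 ≠ [] then 1 else 0)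
  if st.2.1 ≠ [] ∧ new_len > 500 then
    (st.1 ++ [PySem.Str.join "\n" st.2.1], [line], PySem.Str.len line)
  else
    (st.1, st.2.1 ++ [line], new_len)

theorem pvW_nil : pvW [] = 0 := rfl

theorem pvW_cons (l : String) (ls : List String) :
    pvW (l :: ls) = PySem.Str.len l + 1 + pvW ls := by simp [pvW]

theorem pvW_append (xs ys : List String) : pvW (xs ++ ys) = pvW xs + pvW ys := by
  simp [pvW]

theorem pvW_nonneg (ls : List String) : 0 ≤ pvW ls := by
  induction ls with
  | nil => simp [pvW_nil]
  | cons l ls ih =>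
    have : (0:Int) ≤ PySem.Str.len l := by simp [PySem.Str.len_eq]
    rw [pvW_cons]; omega

theorem pvW_take_mono (ls : List String) (a b : Nat) (h : a ≤ b) :
    pvW (ls.take a) ≤ pvW (ls.take b) := by
  have hb : b = a + (b - a) := by omega
  rw [hb, List.take_add, pvW_append]
  have := pvW_nonneg ((ls.drop a).take (b - a))
  omega

-- A's strip-and-skip loop over the raw lines is the plain loop over the cleaned lines
theorem pv_filter_bridge (lines : List String) (st : List String × List String × Int) :
    lines.foldl pvAstep st =
      ((lines.map PySem.Str.strip).filter (fun s => decide (s ≠ ""))).foldl pvGA st := by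
  induction lines generalizing st with
  | nil => rfl
  | cons l rest ih =>
    simp only [List.foldl_cons, List.map_cons, List.filter_cons]
    by_cases hl : PySem.Str.strip l = ""
    · simp [pvAstep, hl, ih]
    · simp [pvAstep, pvGA, hl, ih]

theorem pvGc_le_length (acc : Int) (ls : List String) : pvGc acc ls ≤ ls.length := by
  induction ls generalizing acc with
  | nil => simp [pvGc]
  | cons l ls ih =>
    simp only [pvGc]
    split
    · have := ih (acc + PySem.Str.len l + 1)
      simp only [List.length_cons]
      omega
    · simp

theorem pvGc_fits (acc : Int) (ls : List String) :
    pvGc acc ls = 0 ∨ acc + pvW (ls.take (pvGc acc ls)) ≤ 500 := by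
  induction ls generalizing acc with
  | nil => left; rfl
  | cons l ls ih =>
    simp only [pvGc]
    split
    · rename_i hfit
      right
      rcases ih (acc + PySem.Str.len l + 1) with h0 | hle
      · rw [h0]
        simp only [List.take_succ_cons, List.take_zero, pvW_cons, pvW_nil]
        try omega
      · simp only [List.take_succ_cons, pvW_cons]
        omega
    · left; rfl

theorem pvGc_maximal (acc : Int) (ls : List String) (h : pvGc acc ls < ls.length) :
    acc + pvW (ls.take (pvGc acc ls + 1)) > 500 := by
  induction ls generalizing acc with
  | nil => simp [pvGc] at h
  | cons l ls ih =>
    simp only [pvGc] at h ⊢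
    split
    · rename_i hfit
      rw [if_pos hfit] at h
      simp only [List.length_cons] at h
      have := ih (acc + PySem.Str.len l + 1) (by omega)
      simp only [List.take_succ_cons, pvW_cons]
      omega
    · rename_i hnf
      simp only [List.take_succ_cons, List.take_zero, pvW_cons, pvW_nil]
      omega

-- ---- A-side: A's fold over cleaned lines computes pvChunkRec ----

theorem pvA_loop (ls cur res : List String) (hc : cur ≠ []) :
    (if (ls.foldl pvGA (res, cur, pvW cur - 1)).2.1 ≠ [] then
        (ls.foldl pvGA (res, cur, pvW cur - 1)).1 ++
          [PySem.Str.join "\n" (ls.foldl pvGA (res, cur, pvW cur - 1)).2.1]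
      else (ls.foldl pvGA (res, cur, pvW cur - 1)).1)
      = res ++ (PySem.Str.join "\n" (cur ++ ls.take (pvGc (pvW cur - 1) ls)) ::
          pvChunkRec (ls.drop (pvGc (pvW cur - 1) ls))) := by
  induction ls generalizing cur res with
  | nil => simp [pvGc, pvChunkRec_nil, hc]
  | cons l ls ih =>
    simp only [List.foldl_cons]
    by_cases hfit : pvW cur - 1 + PySem.Str.len l + 1 ≤ 500
    · have hA : pvGA (res, cur, pvW cur - 1) l
          = (res, cur ++ [l], pvW (cur ++ [l]) - 1) := by
        simp only [pvGA]
        rw [if_neg]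
        · have : pvW (cur ++ [l]) = pvW cur + PySem.Str.len l + 1 := by
            rw [pvW_append, pvW_cons, pvW_nil]; ring
          simp [hc, this]
          ring
        · simp only [hc, ne_eq, not_false_eq_true, if_true]
          intro hcon
          omega
      have hgc : pvGc (pvW cur - 1) (l :: ls)
          = pvGc (pvW cur - 1 + PySem.Str.len l + 1) ls + 1 := by
        simp only [pvGc]
        rw [if_pos hfit]
      have hacc : pvW (cur ++ [l]) - 1 = pvW cur - 1 + PySem.Str.len l + 1 := by
        rw [pvW_append, pvW_cons, pvW_nil]; ring
      rw [hA, ih (cur ++ [l]) res (by simp), hacc, hgc]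
      simp only [List.take_succ_cons, List.drop_succ_cons, List.append_assoc,
        List.singleton_append]
    · have hA : pvGA (res, cur, pvW cur - 1) l
          = (res ++ [PySem.Str.join "\n" cur], [l], PySem.Str.len l) := by
        simp only [pvGA]
        rw [if_pos]
        refine ⟨hc, ?_⟩
        simp only [hc, ne_eq, not_false_eq_true, if_true]
        omega
      have hgc : pvGc (pvW cur - 1) (l :: ls) = 0 := by
        simp only [pvGc]
        rw [if_neg hfit]
      have hl1 : PySem.Str.len l = pvW [l] - 1 := by
        rw [pvW_cons, pvW_nil]; ring
      rw [hA, hl1, ih [l] (res ++ [PySem.Str.join "\n" cur]) (by simp), hgc]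
      have hl2 : pvW [l] - 1 = PySem.Str.len l := by rw [pvW_cons, pvW_nil]; ring
      rw [hl2]
      simp [pvChunkRec_cons]

theorem pvA_eq_chunkRec (cleaned : List String) :
    (if (cleaned.foldl pvGA ([], [], 0)).2.1 ≠ [] then
        (cleaned.foldl pvGA ([], [], 0)).1 ++
          [PySem.Str.join "\n" (cleaned.foldl pvGA ([], [], 0)).2.1]
      else (cleaned.foldl pvGA ([], [], 0)).1)
      = pvChunkRec cleaned := by
  cases cleaned with
  | nil => simp [pvChunkRec_nil]
  | cons l ls =>
    simp only [List.foldl_cons]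
    have hA : pvGA ([], [], 0) l = ([], [l], pvW [l] - 1) := by
      simp only [pvGA]
      rw [if_neg (by simp)]
      simp [pvW_cons, pvW_nil]
    rw [hA, pvA_loop ls [l] [] (by simp)]
    have hl2 : pvW [l] - 1 = PySem.Str.len l := by rw [pvW_cons, pvW_nil]; ring
    rw [hl2]
    simp [pvChunkRec_cons]

-- ---- B-side: the prefix list holds the weights of the prefixes of cleaned ----

def pvSums (a : Int) : List String → List Int
  | [] => []
  | s :: ls => (a + PySem.Str.len s + 1) :: pvSums (a + PySem.Str.len s + 1) ls

theorem pvPrefix_eq (ls : List String) (p : List Int) (a : Int) (hp : p ≠ [])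
    (hl : p.getLast hp = a) : ls.foldl pvPrefixStep p = p ++ pvSums a ls := by
  induction ls generalizing p a with
  | nil => simp [pvSums]
  | cons s ls ih =>
    simp only [List.foldl_cons, pvPrefixStep]
    rw [PySem.List.pyGetD_neg_one p 0 hp, hl]
    rw [ih (p ++ [a + PySem.Str.len s + 1]) (a + PySem.Str.len s + 1) (by simp)
      (List.getLast_append_singleton p)]
    simp [pvSums]

theorem pvSums_getD (a : Int) (ls : List String) (k : Nat) (hk : k < ls.length) :
    (pvSums a ls).getD k 0 = a + pvW (ls.take (k + 1)) := by
  induction ls generalizing a k with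
  | nil => simp at hk
  | cons s ls ih =>
    cases k with
    | zero =>
      simp only [pvSums, List.getD_cons_zero, List.take_succ_cons, List.take_zero,
        pvW_cons, pvW_nil]
      ring
    | succ k =>
      simp only [pvSums, List.getD_cons_succ]
      rw [ih (a + PySem.Str.len s + 1) k (by simp at hk; omega)]
      simp only [List.take_succ_cons, pvW_cons]
      ring

theorem pvPrefix_getD (cleaned : List String) (k : Nat) (hk : k ≤ cleaned.length) :
    (cleaned.foldl pvPrefixStep [0]).getD k 0 = pvW (cleaned.take k) := by
  rw [pvPrefix_eq cleaned [0] 0 (by simp) (by simp)]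
  cases k with
  | zero => simp [pvW_nil]
  | succ k =>
    simp only [List.singleton_append, List.getD_cons_succ]
    rw [pvSums_getD 0 cleaned k (by omega)]
    omega

-- ---- the binary search: invariant and uniqueness ----

theorem pvBsearch_spec (pf : List Int) (i lo hi : Int) : lo ≤ hi →
    lo ≤ pvBsearch pf i lo hi ∧ pvBsearch pf i lo hi ≤ hi ∧
    (pvBsearch pf i lo hi = lo ∨
      PySem.List.pyGetD pf (pvBsearch pf i lo hi) 0 - PySem.List.pyGetD pf i 0 - 1 ≤ 500) ∧
    (pvBsearch pf i lo hi < hi →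
      ¬ (PySem.List.pyGetD pf (pvBsearch pf i lo hi + 1) 0 - PySem.List.pyGetD pf i 0 - 1 ≤ 500)) := by
  fun_induction pvBsearch pf i lo hi with
  | case1 lo hi hlt mid hc ih =>
    intro _
    have hmid : lo + 1 ≤ mid ∧ mid ≤ hi := by
      simp only [mid]
      rw [show lo + hi + 1 = lo + 1 + hi by ring]
      exact PySem.Int.floordiv_two_mid_bounds (by omega)
    obtain ⟨h1', h2', h3', h4'⟩ := ih (by omega)
    refine ⟨by omega, h2', ?_, h4'⟩
    rcases h3' with h | h
    · right; rw [h]; exact hc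
    · right; exact h
  | case2 lo hi hlt mid hc ih =>
    intro _
    have hmid : lo + 1 ≤ mid ∧ mid ≤ hi := by
      simp only [mid]
      rw [show lo + hi + 1 = lo + 1 + hi by ring]
      exact PySem.Int.floordiv_two_mid_bounds (by omega)
    obtain ⟨h1', h2', h3', h4'⟩ := ih (by omega)
    refine ⟨h1', by omega, h3', ?_⟩
    intro hr
    by_cases hcase : pvBsearch pf i lo (mid - 1) < mid - 1
    · exact h4' hcase
    · have heq : pvBsearch pf i lo (mid - 1) = mid - 1 := by omega
      rw [heq, Int.sub_add_cancel]
      exact hc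
  | case3 lo hi hge =>
    intro h
    exact ⟨le_refl lo, h, Or.inl rfl, fun h' => absurd h' (by omega)⟩

theorem pvBsearch_eq (pf : List Int) (i lo hi j : Int) (h : lo ≤ hi)
    (hmono : ∀ a b : Int, lo ≤ a → a ≤ b → b ≤ hi →
      PySem.List.pyGetD pf b 0 - PySem.List.pyGetD pf i 0 - 1 ≤ 500 →
      PySem.List.pyGetD pf a 0 - PySem.List.pyGetD pf i 0 - 1 ≤ 500)
    (hj1 : lo ≤ j) (hj2 : j ≤ hi)
    (hj3 : j = lo ∨ PySem.List.pyGetD pf j 0 - PySem.List.pyGetD pf i 0 - 1 ≤ 500)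
    (hj4 : j < hi → ¬ (PySem.List.pyGetD pf (j + 1) 0 - PySem.List.pyGetD pf i 0 - 1 ≤ 500)) :
    pvBsearch pf i lo hi = j := by
  obtain ⟨h1, h2, h3, h4⟩ := pvBsearch_spec pf i lo hi h
  set r := pvBsearch pf i lo hi with hr
  rcases lt_trichotomy r j with hlt | heq | hgt
  · exfalso
    have hnc := h4 (by omega)
    rcases hj3 with h' | h'
    · omega
    · exact hnc (hmono (r + 1) j (by omega) (by omega) (by omega) h')
  · exact heq
  · exfalso
    have hnc := hj4 (by omega)
    rcases h3 with h' | h'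
    · omega
    · exact hnc (hmono (j + 1) r (by omega) (by omega) (by omega) h')

-- ---- B's outer loop computes pvChunkRec on the suffix ----

theorem pvChunksLoop_eq_aux (cleaned : List String) (fuel : Nat) : ∀ (i : Nat),
    cleaned.length - i = fuel → i ≤ cleaned.length →
    pvChunksLoop cleaned (cleaned.foldl pvPrefixStep [0]) (i : Int)
      = pvChunkRec (cleaned.drop i) := by
  induction fuel using Nat.strong_induction_on with
  | _ fuel ih =>
    intro i hfuel hile
    by_cases hlt : i < cleaned.length
    case neg =>
      rw [pvChunksLoop.eq_def, dif_neg (by omega),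
        List.drop_eq_nil_of_le (by omega), pvChunkRec_nil]
    case pos =>
      have hdrop : cleaned.drop i = cleaned[i] :: cleaned.drop (i + 1) :=
        List.drop_eq_getElem_cons hlt
      have hck : ∀ k : Nat, k ≤ cleaned.length →
          PySem.List.pyGetD (cleaned.foldl pvPrefixStep [0]) ((k : Nat) : Int) 0
            = pvW (cleaned.take k) := by
        intro k hk
        rw [PySem.List.pyGetD_natCast, pvPrefix_getD cleaned k hk]
      have hWsplit : ∀ t : Nat, pvW (cleaned.take (i + 1 + t))
          = pvW (cleaned.take i) + (PySem.Str.len cleaned[i] + 1 + pvW ((cleaned.drop (i + 1)).take t)) := by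
        intro t
        rw [show i + 1 + t = i + (1 + t) by omega, List.take_add, pvW_append, hdrop,
          show 1 + t = t + 1 by omega, List.take_succ_cons, pvW_cons]
      have hmlen := pvGc_le_length (PySem.Str.len cleaned[i]) (cleaned.drop (i + 1))
      have hlen' : (cleaned.drop (i + 1)).length = cleaned.length - (i + 1) := by
        simp [List.length_drop]
      -- the boundary the binary search finds is the greedy one
      have hbs : pvBsearch (cleaned.foldl pvPrefixStep [0]) (i : Int) ((i : Int) + 1)
          ((cleaned.length : Nat) : Int)
          = (((i + 1 + pvGc (PySem.Str.len cleaned[i]) (cleaned.drop (i + 1)) : Nat)) : Int) := by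
        apply pvBsearch_eq
        · omega
        · intro a b ha hab hbn hcb
          have ha' : a = ((a.toNat : Nat) : Int) := by omega
          have hb' : b = ((b.toNat : Nat) : Int) := by omega
          rw [ha', hck a.toNat (by omega)]
          rw [hb', hck b.toNat (by omega)] at hcb
          have := pvW_take_mono cleaned a.toNat b.toNat (by omega)
          omega
        · push_cast; omega
        · push_cast; omega
        · rcases pvGc_fits (PySem.Str.len cleaned[i]) (cleaned.drop (i + 1)) with h0 | hfit
          · left; rw [h0]; push_cast; ring
          · right
            rw [hck (i + 1 + pvGc (PySem.Str.len cleaned[i]) (cleaned.drop (i + 1))) (by omega),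
              show ((i : Nat) : Int) = (((i : Nat) : Nat) : Int) from rfl, hck i (by omega),
              hWsplit (pvGc (PySem.Str.len cleaned[i]) (cleaned.drop (i + 1)))]
            omega
        · intro hjn
          have hmlt : pvGc (PySem.Str.len cleaned[i]) (cleaned.drop (i + 1))
              < (cleaned.drop (i + 1)).length := by
            rw [hlen']; push_cast at hjn; omega
          have hmax := pvGc_maximal (PySem.Str.len cleaned[i]) (cleaned.drop (i + 1)) hmlt
          rw [show (((i + 1 + pvGc (PySem.Str.len cleaned[i]) (cleaned.drop (i + 1)) : Nat)) : Int) + 1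
              = (((i + 1 + (pvGc (PySem.Str.len cleaned[i]) (cleaned.drop (i + 1)) + 1) : Nat)) : Int) by push_cast; ring,
            hck (i + 1 + (pvGc (PySem.Str.len cleaned[i]) (cleaned.drop (i + 1)) + 1)) (by omega),
            show ((i : Nat) : Int) = (((i : Nat) : Nat) : Int) from rfl, hck i (by omega),
            hWsplit (pvGc (PySem.Str.len cleaned[i]) (cleaned.drop (i + 1)) + 1)]
          omega
      rw [pvChunksLoop.eq_def, dif_pos (by omega)]
      simp only [hbs]
      rw [PySem.List.slice_natCast cleaned i
          (i + 1 + pvGc (PySem.Str.len cleaned[i]) (cleaned.drop (i + 1))),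
        show i + 1 + pvGc (PySem.Str.len cleaned[i]) (cleaned.drop (i + 1)) - i
            = pvGc (PySem.Str.len cleaned[i]) (cleaned.drop (i + 1)) + 1 by omega,
        hdrop, List.take_succ_cons]
      rw [ih (cleaned.length - (i + 1 + pvGc (PySem.Str.len cleaned[i]) (cleaned.drop (i + 1))))
          (by omega) (i + 1 + pvGc (PySem.Str.len cleaned[i]) (cleaned.drop (i + 1))) rfl (by omega)]
      rw [show cleaned.drop (i + 1 + pvGc (PySem.Str.len cleaned[i]) (cleaned.drop (i + 1)))
          = (cleaned.drop (i + 1)).drop (pvGc (PySem.Str.len cleaned[i]) (cleaned.drop (i + 1))) by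
            rw [List.drop_drop]]
      rw [pvChunkRec_cons]

theorem pvChunksLoop_eq (cleaned : List String) (i : Nat) (hile : i ≤ cleaned.length) :
    pvChunksLoop cleaned (cleaned.foldl pvPrefixStep [0]) (i : Int)
      = pvChunkRec (cleaned.drop i) :=
  pvChunksLoop_eq_aux cleaned (cleaned.length - i) i rfl hile

-- ===== VERDICT (by name: the statement is the Claim_ definition above) =====
theorem split_by_newlines_py_spec : Claim_equal_split_by_newlines_py := by
  intro text _
  show split_by_newlines_py text = split_by_newlines_py_alt text
  unfold split_by_newlines_py split_by_newlines_py_alt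
  simp only []
  rw [pv_filter_bridge]
  have hB : pvChunksLoop
      ((((PySem.Str.split? text "\n").getD []).map PySem.Str.strip).filter
        (fun s => decide (s ≠ "")))
      (((((PySem.Str.split? text "\n").getD []).map PySem.Str.strip).filter
        (fun s => decide (s ≠ ""))).foldl pvPrefixStep [0]) 0
      = pvChunkRec ((((PySem.Str.split? text "\n").getD []).map PySem.Str.strip).filter
        (fun s => decide (s ≠ ""))) := by
    have := pvChunksLoop_eq
      ((((PySem.Str.split? text "\n").getD []).map PySem.Str.strip).filter
        (fun s => decide (s ≠ ""))) 0 (by omega)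
    simpa using this
  rw [hB]
  exact pvA_eq_chunkRec _
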